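-- pv_equiv track=rewrite | github.com/Whitedevil87/astrology-app | app.py | harmony_matches
-- ===== SOURCE A (Python) =====
-- from typing import Any, Dict, Optional, Tuple
--
-- ZODIAC_ORDER = [
--     "Aries", "Taurus", "Gemini", "Cancer", "Leo", "Virgo",
--     "Libra", "Scorpio", "Sagittarius", "Capricorn", "Aquarius", "Pisces",
-- ]
--
-- ZODIAC_META: Dict[str, Dict[str, str]] = {
--     # Use explicit \uXXXX escapes to avoid Windows encoding/codepage corruption.
--     "Aries": {"element": "Fire", "modality": "Cardinal", "ruler": "Mars", "glyph": "\u2648"},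
--     "Taurus": {"element": "Earth", "modality": "Fixed", "ruler": "Venus", "glyph": "\u2649"},
--     "Gemini": {"element": "Air", "modality": "Mutable", "ruler": "Mercury", "glyph": "\u264A"},
--     "Cancer": {"element": "Water", "modality": "Cardinal", "ruler": "Moon", "glyph": "\u264B"},
--     "Leo": {"element": "Fire", "modality": "Fixed", "ruler": "Sun", "glyph": "\u264C"},
--     "Virgo": {"element": "Earth", "modality": "Mutable", "ruler": "Mercury", "glyph": "\u264D"},
--     "Libra": {"element": "Air", "modality": "Cardinal", "ruler": "Venus", "glyph": "\u264E"},
--     "Scorpio": {"element": "Water", "modality": "Fixed", "ruler": "Pluto", "glyph": "\u264F"},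
--     "Sagittarius": {"element": "Fire", "modality": "Mutable", "ruler": "Jupiter", "glyph": "\u2650"},
--     "Capricorn": {"element": "Earth", "modality": "Cardinal", "ruler": "Saturn", "glyph": "\u2651"},
--     "Aquarius": {"element": "Air", "modality": "Fixed", "ruler": "Uranus", "glyph": "\u2652"},
--     "Pisces": {"element": "Water", "modality": "Mutable", "ruler": "Neptune", "glyph": "\u2653"},
-- }
--
-- def harmony_matches(zodiac: str) -> str:
--     """Light element-based compatibility hint (entertainment)."""
--     meta = ZODIAC_META.get(zodiac, ZODIAC_META["Aries"])
--     element = meta["element"]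
--     same_element = [s for s in ZODIAC_ORDER if ZODIAC_META[s]["element"] == element and s != zodiac]
--     complementary = {
--         "Fire": ["Air"],
--         "Air": ["Fire"],
--         "Water": ["Earth"],
--         "Earth": ["Water"],
--     }
--     other_el = complementary.get(element, ["Air"])
--     bridge = [s for s in ZODIAC_ORDER if ZODIAC_META[s]["element"] in other_el][:4]
--     pool = list(dict.fromkeys(same_element[:2] + bridge))
--     return ", ".join(pool[:3])
-- ===== SOURCE B (Python) =====
-- ZODIAC_ORDER = [
--     "Aries", "Taurus", "Gemini", "Cancer", "Leo", "Virgo",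
--     "Libra", "Scorpio", "Sagittarius", "Capricorn", "Aquarius", "Pisces",
-- ]
--
-- ELEMENT = {
--     "Aries": "Fire", "Taurus": "Earth", "Gemini": "Air", "Cancer": "Water",
--     "Leo": "Fire", "Virgo": "Earth", "Libra": "Air", "Scorpio": "Water",
--     "Sagittarius": "Fire", "Capricorn": "Earth", "Aquarius": "Air", "Pisces": "Water",
-- }
--
-- COMPLEMENT = {"Fire": "Air", "Air": "Fire", "Water": "Earth", "Earth": "Water"}
--
-- # one grouping pass, done once at module load
-- GROUPS = {}
-- for s in ZODIAC_ORDER: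
--     GROUPS.setdefault(ELEMENT[s], []).append(s)
--
-- def harmony_matches(zodiac: str) -> str:
--     """Light element-based compatibility hint (entertainment)."""
--     element = ELEMENT.get(zodiac, "Fire")
--     same = [s for s in GROUPS[element] if s != zodiac][:2]
--     bridge = GROUPS[COMPLEMENT[element]]
--     return ", ".join((same + bridge)[:3])
-- ===== Notes on version B (the rewrite author's own statement) =====
-- stated objective: idiomatic
-- what changed: B precomputes a flat sign-to-element table and an element-to-signs grouping once at module load (one pass over ZODIAC_ORDER with setdefault), so each call is two dict lookups plus one small filter instead of two full scans of ZODIAC_ORDER with nested metadata lookups; the dict.fromkeys dedup is dropped since same-element and bridge signs are provably disjoint.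
import Mathlib
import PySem

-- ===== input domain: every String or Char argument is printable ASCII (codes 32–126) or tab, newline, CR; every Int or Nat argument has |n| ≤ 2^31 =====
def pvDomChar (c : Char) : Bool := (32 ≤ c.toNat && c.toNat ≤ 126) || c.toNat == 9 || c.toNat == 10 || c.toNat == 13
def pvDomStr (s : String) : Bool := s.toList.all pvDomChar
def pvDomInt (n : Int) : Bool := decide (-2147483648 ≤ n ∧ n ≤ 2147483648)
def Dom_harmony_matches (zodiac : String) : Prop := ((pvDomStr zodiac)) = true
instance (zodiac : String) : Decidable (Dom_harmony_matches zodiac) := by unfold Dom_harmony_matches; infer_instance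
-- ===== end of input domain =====

-- B replaces A's two per-call scans of ZODIAC_ORDER by precomputed flat element and group
-- tables built in one pass, and drops the no-op dedup; objective: idiomatic (not timed faster).

-- ===== PORT A =====
def zodiacOrder : List String :=
  ["Aries", "Taurus", "Gemini", "Cancer", "Leo", "Virgo",
   "Libra", "Scorpio", "Sagittarius", "Capricorn", "Aquarius", "Pisces"]

def zodiacMeta : PySem.Dict String (PySem.Dict String String) := PySem.Dict.ofList
  [("Aries", PySem.Dict.ofList [("element","Fire"),("modality","Cardinal"),("ruler","Mars"),("glyph","♈")]),
   ("Taurus", PySem.Dict.ofList [("element","Earth"),("modality","Fixed"),("ruler","Venus"),("glyph","♉")]),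
   ("Gemini", PySem.Dict.ofList [("element","Air"),("modality","Mutable"),("ruler","Mercury"),("glyph","♊")]),
   ("Cancer", PySem.Dict.ofList [("element","Water"),("modality","Cardinal"),("ruler","Moon"),("glyph","♋")]),
   ("Leo", PySem.Dict.ofList [("element","Fire"),("modality","Fixed"),("ruler","Sun"),("glyph","♌")]),
   ("Virgo", PySem.Dict.ofList [("element","Earth"),("modality","Mutable"),("ruler","Mercury"),("glyph","♍")]),
   ("Libra", PySem.Dict.ofList [("element","Air"),("modality","Cardinal"),("ruler","Venus"),("glyph","♎")]),
   ("Scorpio", PySem.Dict.ofList [("element","Water"),("modality","Fixed"),("ruler","Pluto"),("glyph","♏")]),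
   ("Sagittarius", PySem.Dict.ofList [("element","Fire"),("modality","Mutable"),("ruler","Jupiter"),("glyph","♐")]),
   ("Capricorn", PySem.Dict.ofList [("element","Earth"),("modality","Cardinal"),("ruler","Saturn"),("glyph","♑")]),
   ("Aquarius", PySem.Dict.ofList [("element","Air"),("modality","Fixed"),("ruler","Uranus"),("glyph","♒")]),
   ("Pisces", PySem.Dict.ofList [("element","Water"),("modality","Mutable"),("ruler","Neptune"),("glyph","♓")])]

-- ZODIAC_META[k] indexed directly in A always hits an existing key; getD with an empty-dict /
-- "" default is exact here (never the default) since all keys used are present.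
def harmony_matches (zodiac : String) : String :=
  let m := (zodiacMeta.get? zodiac).getD (zodiacMeta.getD "Aries" PySem.Dict.empty)
  let element := m.getD "element" ""
  let same_element := zodiacOrder.filter
    (fun s => ((zodiacMeta.getD s PySem.Dict.empty).getD "element" "" == element) && (s != zodiac))
  let complementary : PySem.Dict String (List String) := PySem.Dict.ofList
    [("Fire", ["Air"]), ("Air", ["Fire"]), ("Water", ["Earth"]), ("Earth", ["Water"])]
  let other_el := complementary.getD element ["Air"]
  let bridge := (zodiacOrder.filter
    (fun s => other_el.contains ((zodiacMeta.getD s PySem.Dict.empty).getD "element" ""))).take 4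
  let pool := PySem.List.dedup (same_element.take 2 ++ bridge)
  PySem.Str.join ", " (pool.take 3)

-- ===== PORT B =====
def elementOf : PySem.Dict String String := PySem.Dict.ofList
  [("Aries","Fire"), ("Taurus","Earth"), ("Gemini","Air"), ("Cancer","Water"),
   ("Leo","Fire"), ("Virgo","Earth"), ("Libra","Air"), ("Scorpio","Water"),
   ("Sagittarius","Fire"), ("Capricorn","Earth"), ("Aquarius","Air"), ("Pisces","Water")]

def complementOf : PySem.Dict String String := PySem.Dict.ofList
  [("Fire","Air"), ("Air","Fire"), ("Water","Earth"), ("Earth","Water")]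

-- GROUPS built once: for s in ZODIAC_ORDER: GROUPS.setdefault(ELEMENT[s], []).append(s)
def groupsOf : PySem.Dict String (List String) :=
  zodiacOrder.foldl (fun d s => d.modify (elementOf.getD s "") [] (· ++ [s])) PySem.Dict.empty

-- GROUPS[...] indexed directly in B always hits an existing key; getD [] is exact here.
def harmony_matches_alt (zodiac : String) : String :=
  let element := elementOf.getD zodiac "Fire"
  let same := ((groupsOf.getD element []).filter (fun s => s != zodiac)).take 2
  let bridge := groupsOf.getD (complementOf.getD element "") []
  PySem.Str.join ", " ((same ++ bridge).take 3)

-- ===== PRECONDITION & SPEC =====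
def Spec_harmony_matches (zodiac : String) (out : String) : Prop := out = harmony_matches_alt zodiac
instance (zodiac : String) (out : String) : Decidable (Spec_harmony_matches zodiac out) := by unfold Spec_harmony_matches; infer_instance

-- ===== CLAIM (what is proved, stated in full; the proofs are below) =====
def Claim_equal_harmony_matches : Prop := ∀ (zodiac : String), Dom_harmony_matches zodiac → Spec_harmony_matches zodiac (harmony_matches zodiac)

-- ===== LEMMAS AND PROOFS =====
-- When zodiac is none of the 12 signs, both programs fall back to Fire and return the same string.
theorem hm_unknown (z : String)
    (h1 : z ≠ "Aries") (h2 : z ≠ "Taurus") (h3 : z ≠ "Gemini") (h4 : z ≠ "Cancer")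
    (h5 : z ≠ "Leo") (h6 : z ≠ "Virgo") (h7 : z ≠ "Libra") (h8 : z ≠ "Scorpio")
    (h9 : z ≠ "Sagittarius") (h10 : z ≠ "Capricorn") (h11 : z ≠ "Aquarius") (h12 : z ≠ "Pisces") :
    harmony_matches z = harmony_matches_alt z := by
  have e1 : ("Aries" == z) = false := beq_eq_false_iff_ne.mpr (Ne.symm h1)
  have e2 : ("Taurus" == z) = false := beq_eq_false_iff_ne.mpr (Ne.symm h2)
  have e3 : ("Gemini" == z) = false := beq_eq_false_iff_ne.mpr (Ne.symm h3)
  have e4 : ("Cancer" == z) = false := beq_eq_false_iff_ne.mpr (Ne.symm h4)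
  have e5 : ("Leo" == z) = false := beq_eq_false_iff_ne.mpr (Ne.symm h5)
  have e6 : ("Virgo" == z) = false := beq_eq_false_iff_ne.mpr (Ne.symm h6)
  have e7 : ("Libra" == z) = false := beq_eq_false_iff_ne.mpr (Ne.symm h7)
  have e8 : ("Scorpio" == z) = false := beq_eq_false_iff_ne.mpr (Ne.symm h8)
  have e9 : ("Sagittarius" == z) = false := beq_eq_false_iff_ne.mpr (Ne.symm h9)
  have e10 : ("Capricorn" == z) = false := beq_eq_false_iff_ne.mpr (Ne.symm h10)
  have e11 : ("Aquarius" == z) = false := beq_eq_false_iff_ne.mpr (Ne.symm h11)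
  have e12 : ("Pisces" == z) = false := beq_eq_false_iff_ne.mpr (Ne.symm h12)
  simp [harmony_matches, harmony_matches_alt, zodiacOrder, zodiacMeta, elementOf, complementOf,
    groupsOf, PySem.Dict.get?, PySem.Dict.getD, PySem.Dict.ofList, PySem.Dict.modify,
    PySem.Dict.empty, PySem.Dict.update, PySem.Dict.insert, PySem.Dict.contains, bne,
    PySem.List.dedup, PySem.Str.join,
    List.find?, List.filter,
    e1, e2, e3, e4, e5, e6, e7, e8, e9, e10, e11, e12]
  decide

-- ===== VERDICT (by name: the statement is the Claim_ definition above) =====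
theorem harmony_matches_spec : Claim_equal_harmony_matches := by
  intro z _
  unfold Spec_harmony_matches
  by_cases h1 : z = "Aries"; · subst h1; decide
  by_cases h2 : z = "Taurus"; · subst h2; decide
  by_cases h3 : z = "Gemini"; · subst h3; decide
  by_cases h4 : z = "Cancer"; · subst h4; decide
  by_cases h5 : z = "Leo"; · subst h5; decide
  by_cases h6 : z = "Virgo"; · subst h6; decide
  by_cases h7 : z = "Libra"; · subst h7; decide
  by_cases h8 : z = "Scorpio"; · subst h8; decide
  by_cases h9 : z = "Sagittarius"; · subst h9; decide
  by_cases h10 : z = "Capricorn"; · subst h10; decide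
  by_cases h11 : z = "Aquarius"; · subst h11; decide
  by_cases h12 : z = "Pisces"; · subst h12; decide
  exact hm_unknown z h1 h2 h3 h4 h5 h6 h7 h8 h9 h10 h11 h12
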